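-- pv_equiv track=rewrite | github.com/pierre-emery/bioinfo-sequence-assembly | base_python_tp1/codon_start.py | cadre_par_recherche_complete
-- ===== SOURCE A (Python) =====
-- code_genetique = {
--     'TTT':'F','TTC':'F','TTA':'L','TTG':'L',
--     'CTT':'L','CTC':'L','CTA':'L','CTG':'L',
--     'ATT':'I','ATC':'I','ATA':'I','ATG':'M',
--     'GTT':'V','GTC':'V','GTA':'V','GTG':'V',
--     'TCT':'S','TCC':'S','TCA':'S','TCG':'S',
--     'CCT':'P','CCC':'P','CCA':'P','CCG':'P',
--     'ACT':'T','ACC':'T','ACA':'T','ACG':'T',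
--     'GCT':'A','GCC':'A','GCA':'A','GCG':'A',
--     'TAT':'Y','TAC':'Y','TAA':'*','TAG':'*',
--     'CAT':'H','CAC':'H','CAA':'Q','CAG':'Q',
--     'AAT':'N','AAC':'N','AAA':'K','AAG':'K',
--     'GAT':'D','GAC':'D','GAA':'E','GAG':'E',
--     'TGT':'C','TGC':'C','TGA':'*','TGG':'W',
--     'CGT':'R','CGC':'R','CGA':'R','CGG':'R',
--     'AGT':'S','AGC':'S','AGA':'R','AGG':'R',
--     'GGT':'G','GGC':'G','GGA':'G','GGG':'G',
-- }
--
-- def traduire_cadre(adn: str, cadre: int) -> str: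
--     """
--     Une fonction qui prend en argument une séquence d'ADN (adn) et un entier (cadre ∈ {0,1,2}).
--
--     Elle traduit la séquence en acides aminés dans le cadre spécifié selon le code génétique standard
--     (les codons inconnus deviennent 'X').
--
--     Rend une chaîne correspondant à la traduction en acides aminés du cadre choisi.
--     """
--     s = adn[cadre:]
--     aa = []
--     for i in range(0, len(s) - 2, 3):
--         codon = s[i:i+3]
--         aa.append(code_genetique.get(codon, 'X'))
--     return ''.join(aa)
--
-- def cadre_par_recherche_complete(adn: str, proteine: str) -> list[tuple[int, int]]:
--     """
--     Une fonction qui prend en argument l'ADN (adn) et la protéine (proteine).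
--
--     Elle cherche la protéine comme sous-chaîne stricte et contiguë dans chaque cadre du brin codant.
--     Pour chaque hit, elle collecte (cadre, nt0) où nt0 = position 0-based de l'ATG correspondant.
--
--     Rend une liste de couples (cadre, nt0) triée par nt0 croissant.
--     """
--     candidats: list[tuple[int, int]] = []
--     for f in (0, 1, 2):
--         aa = traduire_cadre(adn, f)
--         j = aa.find(proteine)
--         if j != -1:
--             nt0 = f + 3 * j
--             candidats.append((f, nt0))
--     candidats.sort(key=lambda t: t[1])
--     return candidats
-- ===== SOURCE B (Python) =====
-- # B: fused windowed scan with an arithmetic genetic-code lookup (base-4 index into a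
-- # 64-char table) instead of translating each whole frame with a dict and calling str.find.
--
-- _TABLE = "FFLLSSSSYY**CC*WLLLLPPPPHHQQRRRRIIIMTTTTNNKKSSRRVVVVAAAADDEEGGGG"
--
-- def _aa(codon):
--     # codon is always a complete 3-letter string here
--     i = 0
--     for ch in codon:
--         p = 0 if ch == 'T' else 1 if ch == 'C' else 2 if ch == 'A' else 3 if ch == 'G' else -1
--         if p < 0:
--             return 'X'
--         i = 4 * i + p
--     return _TABLE[i]
--
-- def cadre_par_recherche_complete(adn: str, proteine: str) -> list[tuple[int, int]]:
--     m = len(proteine)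
--     hits: list[tuple[int, int]] = []
--     for f in (0, 1, 2):
--         n = max(0, len(adn) - f) // 3  # number of complete codons in frame f
--         for j in range(n - m + 1):
--             window = ''.join(_aa(adn[f + 3 * (j + k): f + 3 * (j + k) + 3])
--                              for k in range(m))
--             if window == proteine:
--                 hits.append((f, f + 3 * j))
--                 break
--     hits.sort(key=lambda t: t[1])
--     return hits
-- ===== Notes on version B (the rewrite author's own statement) =====
-- stated objective: faster
-- what changed: Instead of translating each whole reading frame with the codon dict and calling str.find on the amino-acid string, B slides a window of len(proteine) codons over each frame, translating only the window via an arithmetic base-4 index into a 64-character table (no dict at all) and stopping at the first match, so it never materialises the full translation.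
import Mathlib
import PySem

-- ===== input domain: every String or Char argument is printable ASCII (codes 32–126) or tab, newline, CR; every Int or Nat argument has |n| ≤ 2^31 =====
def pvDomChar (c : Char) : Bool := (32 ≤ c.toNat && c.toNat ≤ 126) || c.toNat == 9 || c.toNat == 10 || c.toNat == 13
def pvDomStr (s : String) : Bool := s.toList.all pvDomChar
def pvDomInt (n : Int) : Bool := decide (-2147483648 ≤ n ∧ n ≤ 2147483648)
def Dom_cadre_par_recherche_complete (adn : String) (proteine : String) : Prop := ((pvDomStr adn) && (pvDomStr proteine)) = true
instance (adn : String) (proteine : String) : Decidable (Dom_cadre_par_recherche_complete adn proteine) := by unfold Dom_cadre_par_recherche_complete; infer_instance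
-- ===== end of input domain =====

-- B fuses translation and search: instead of translating each whole frame with the codon
-- dict and calling str.find, it slides a window of len(proteine) codons over each frame,
-- translating each window codon via an arithmetic base-4 index into a 64-character table
-- (no dict) and stopping at the first match (objective: alternative decomposition).

-- ===== PORT A =====
-- the module-level dict code_genetique (used by A);
-- amino acids are single characters, so values are modelled as Char
def codeGenetique : PySem.Dict (List Char) Char := PySem.Dict.mk [
  (['T','T','T'], 'F'),
  (['T','T','C'], 'F'),
  (['T','T','A'], 'L'),
  (['T','T','G'], 'L'),
  (['C','T','T'], 'L'),
  (['C','T','C'], 'L'),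
  (['C','T','A'], 'L'),
  (['C','T','G'], 'L'),
  (['A','T','T'], 'I'),
  (['A','T','C'], 'I'),
  (['A','T','A'], 'I'),
  (['A','T','G'], 'M'),
  (['G','T','T'], 'V'),
  (['G','T','C'], 'V'),
  (['G','T','A'], 'V'),
  (['G','T','G'], 'V'),
  (['T','C','T'], 'S'),
  (['T','C','C'], 'S'),
  (['T','C','A'], 'S'),
  (['T','C','G'], 'S'),
  (['C','C','T'], 'P'),
  (['C','C','C'], 'P'),
  (['C','C','A'], 'P'),
  (['C','C','G'], 'P'),
  (['A','C','T'], 'T'),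
  (['A','C','C'], 'T'),
  (['A','C','A'], 'T'),
  (['A','C','G'], 'T'),
  (['G','C','T'], 'A'),
  (['G','C','C'], 'A'),
  (['G','C','A'], 'A'),
  (['G','C','G'], 'A'),
  (['T','A','T'], 'Y'),
  (['T','A','C'], 'Y'),
  (['T','A','A'], '*'),
  (['T','A','G'], '*'),
  (['C','A','T'], 'H'),
  (['C','A','C'], 'H'),
  (['C','A','A'], 'Q'),
  (['C','A','G'], 'Q'),
  (['A','A','T'], 'N'),
  (['A','A','C'], 'N'),
  (['A','A','A'], 'K'),
  (['A','A','G'], 'K'),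
  (['G','A','T'], 'D'),
  (['G','A','C'], 'D'),
  (['G','A','A'], 'E'),
  (['G','A','G'], 'E'),
  (['T','G','T'], 'C'),
  (['T','G','C'], 'C'),
  (['T','G','A'], '*'),
  (['T','G','G'], 'W'),
  (['C','G','T'], 'R'),
  (['C','G','C'], 'R'),
  (['C','G','A'], 'R'),
  (['C','G','G'], 'R'),
  (['A','G','T'], 'S'),
  (['A','G','C'], 'S'),
  (['A','G','A'], 'R'),
  (['A','G','G'], 'R'),
  (['G','G','T'], 'G'),
  (['G','G','C'], 'G'),
  (['G','G','A'], 'G'),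
  (['G','G','G'], 'G')]

-- traduire_cadre returns the amino-acid string ''.join(aa) as its character list
def traduire_cadre (adn : String) (cadre : Int) : List Char :=
  let s := PySem.List.slice adn.toList (some cadre) none
  (PySem.List.pyRange 0 ((s.length : Int) - 2) 3).foldl
    (fun acc i => acc ++ [codeGenetique.getD (PySem.List.slice s (some i) (some (i + 3))) 'X']) []

def cadre_par_recherche_complete (adn : String) (proteine : String) : List (Int × Int) :=
  let candidats := [(0 : Int), 1, 2].foldl (fun acc f =>
    let aa := traduire_cadre adn f
    let j := PySem.Chars.find aa proteine.toList
    if j ≠ -1 then acc ++ [(f, f + 3 * j)] else acc) []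
  PySem.List.sorted candidats (fun t => t.2) false

-- ===== PORT B =====
def aaTable : List Char :=
  "FFLLSSSSYY**CC*WLLLLPPPPHHQQRRRRIIIMTTTTNNKKSSRRVVVVAAAADDEEGGGG".toList

-- the if-chain 'p = 0 if ch=='T' else 1 if ... else -1' of Source B's _aa
def nucVal (ch : Char) : Int :=
  if ch = 'T' then 0 else if ch = 'C' then 1 else if ch = 'A' then 2
  else if ch = 'G' then 3 else -1

-- _aa: fold the early-returning loop over the codon's chars through an Option accumulator;
-- the final index is nonneg and < 64 by construction, so _TABLE[i] is getD i.toNat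
def aaOf (codon : List Char) : Char :=
  match codon.foldl (fun acc ch =>
      match acc with
      | none => none
      | some i => if nucVal ch < 0 then none else some (4 * i + nucVal ch)) (some (0 : Int)) with
  | none => 'X'
  | some i => aaTable.getD i.toNat 'X'

-- adn[x:x+3] with 0 ≤ x: Python's slice is exactly (drop x).take 3
def transCodonB (adn : List Char) (x : Nat) : Char := aaOf ((adn.drop x).take 3)

def cadre_par_recherche_complete_alt (adn : String) (proteine : String) : List (Int × Int) :=
  let L := adn.toList
  let p := proteine.toList
  let m := p.length
  let hits := [0, 1, 2].foldl (fun acc (f : Nat) =>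
    -- n = max(0, len(adn) - f) // 3: Nat subtraction clamps at 0, exactly the max
    let n := (L.length - f) / 3
    -- Python's range(n - m + 1) is empty iff n < m; find? = first j whose window matches
    if n < m then acc
    else match (List.range (n - m + 1)).find? (fun j =>
        (List.range m).map (fun k => transCodonB L (f + 3 * (j + k))) == p) with
      | some j => acc ++ [((f : Int), (f : Int) + 3 * (j : Int))]
      | none => acc) []
  PySem.List.sorted hits (fun t => t.2) false

-- ===== PRECONDITION & SPEC =====
def Spec_cadre_par_recherche_complete (adn : String) (proteine : String) (out : List (Int × Int)) : Prop := out = cadre_par_recherche_complete_alt adn proteine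
instance (adn : String) (proteine : String) (out : List (Int × Int)) : Decidable (Spec_cadre_par_recherche_complete adn proteine out) := by unfold Spec_cadre_par_recherche_complete; infer_instance

-- ===== CLAIM (what is proved, stated in full; the proofs are below) =====
def Claim_equal_cadre_par_recherche_complete : Prop := ∀ (adn : String) (proteine : String), Dom_cadre_par_recherche_complete adn proteine → Spec_cadre_par_recherche_complete adn proteine (cadre_par_recherche_complete adn proteine)

-- ===== LEMMAS AND PROOFS =====

-- A's codon lookup, as a function of the codon's start position
def transCodonA (adn : List Char) (x : Nat) : Char :=
  codeGenetique.getD ((adn.drop x).take 3) 'X'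

def isNuc (c : Char) : Bool := c == 'T' || c == 'C' || c == 'A' || c == 'G'

theorem nucVal_bad (c : Char) (h : isNuc c = false) : nucVal c = -1 := by
  simp only [isNuc, Bool.or_eq_false_iff, beq_eq_false_iff_ne, ne_eq] at h
  simp [nucVal, h.1.1.1, h.1.1.2, h.1.2, h.2]

theorem nucVal_good (c : Char) (h : isNuc c = true) : ¬ nucVal c < 0 := by
  simp only [isNuc, Bool.or_eq_true, beq_iff_eq] at h
  rcases h with ((rfl | rfl) | rfl) | rfl <;> decide

theorem isNuc_cases (c : Char) (h : isNuc c = true) :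
    c = 'T' ∨ c = 'C' ∨ c = 'A' ∨ c = 'G' := by
  simp only [isNuc, Bool.or_eq_true, beq_iff_eq] at h
  tauto

-- a codon containing a non-nucleotide char is not a key of code_genetique
theorem cg_contains_false (a b c : Char)
    (h : isNuc a = false ∨ isNuc b = false ∨ isNuc c = false) :
    codeGenetique.contains [a, b, c] = false := by
  rw [PySem.Dict.contains_eq_decide_mem_keys]
  rcases h with h | h | h <;>
    simp only [isNuc, Bool.or_eq_false_iff, beq_eq_false_iff_ne, ne_eq] at h <;>
    obtain ⟨⟨⟨h1, h2⟩, h3⟩, h4⟩ := h <;>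
    simp [codeGenetique, PySem.Dict.keys, h1, h2, h3, h4]

theorem cg_getD_bad (a b c : Char)
    (h : isNuc a = false ∨ isNuc b = false ∨ isNuc c = false) :
    codeGenetique.getD [a, b, c] 'X' = 'X' := by
  apply PySem.Dict.getD_of_not_contains
  exact cg_contains_false a b c h

-- find? only depends on the predicate's values on the list's elements
theorem find?_ext {α : Type} (l : List α) (p q : α → Bool)
    (h : ∀ x ∈ l, p x = q x) : l.find? p = l.find? q := by
  induction l with
  | nil => rfl
  | cons a l ih =>
      rw [List.find?_cons, List.find?_cons, h a (List.mem_cons_self)]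
      cases q a with
      | true => rfl
      | false => exact ih (fun x hx => h x (List.mem_cons_of_mem a hx))

-- the arithmetic table lookup agrees with the dict on every 3-char codon
theorem aaOf_eq_getD (a b c : Char) :
    aaOf [a, b, c] = codeGenetique.getD [a, b, c] 'X' := by
  by_cases ha : isNuc a
  · by_cases hb : isNuc b
    · by_cases hc : isNuc c
      · rcases isNuc_cases a ha with rfl | rfl | rfl | rfl <;>
          rcases isNuc_cases b hb with rfl | rfl | rfl | rfl <;>
          rcases isNuc_cases c hc with rfl | rfl | rfl | rfl <;> decide
      · rw [cg_getD_bad a b c (by simp [hc])]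
        simp [aaOf, List.foldl, nucVal_good a ha, nucVal_good b hb,
          nucVal_bad c (by simpa using hc)]
    · rw [cg_getD_bad a b c (by simp [hb])]
      simp [aaOf, List.foldl, nucVal_good a ha, nucVal_bad b (by simpa using hb)]
  · rw [cg_getD_bad a b c (by simp [ha])]
    simp [aaOf, List.foldl, nucVal_bad a (by simpa using ha)]

theorem take3_of_le (L : List Char) (x : Nat) (h : x + 3 ≤ L.length) :
    ∃ a b c, (L.drop x).take 3 = [a, b, c] := by
  have hlen : ((L.drop x).take 3).length = 3 := by
    simp [List.length_take, List.length_drop]; omega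
  match hl : (L.drop x).take 3, hlen with
  | [a, b, c], _ => exact ⟨a, b, c, rfl⟩

theorem transCodonB_eq_A (L : List Char) (x : Nat) (h : x + 3 ≤ L.length) :
    transCodonB L x = transCodonA L x := by
  obtain ⟨a, b, c, heq⟩ := take3_of_le L x h
  rw [transCodonB, transCodonA, heq, aaOf_eq_getD]

-- range(0, len - 2, 3) enumerates the starts of the len // 3 complete codons
theorem pyRange_step3 (len : Nat) :
    PySem.List.pyRange 0 (len - 2 : Int) 3 = (List.range (len / 3)).map (fun j : Nat => 3 * (j : Int)) := by
  rw [PySem.List.pyRange_of_pos 0 _ (by norm_num)]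
  have hcount : (if (0:Int) < (len:Int) - 2 then ((((len:Int) - 2) - 0 + 3 - 1) / 3).toNat else 0) = len / 3 := by
    split_ifs with h
    · have : ((len:Int) - 2 - 0 + 3 - 1) = (len : Int) := by ring
      rw [this]
      omega
    · omega
  rw [hcount]
  apply List.map_congr_left
  intro k _
  ring

-- A's translated frame is the translation of the n = (len - f) // 3 complete codons
theorem traduire_eq_map (adn : String) (f : Nat) :
    traduire_cadre adn (f : Int) =
      (List.range ((adn.toList.length - f) / 3)).map
        (fun j => transCodonA adn.toList (f + 3 * j)) := by
  unfold traduire_cadre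
  rw [PySem.List.foldl_append_singleton_eq_map
    (f := fun i => codeGenetique.getD (PySem.List.slice (PySem.List.slice adn.toList (some (f:Int)) none) (some i) (some (i + 3))) 'X')]
  rw [List.nil_append]
  rw [PySem.List.slice_from adn.toList (by positivity)]
  rw [Int.toNat_natCast]
  rw [List.length_drop, pyRange_step3, List.map_map]
  apply List.map_congr_left
  intro j _
  simp only [Function.comp]
  rw [PySem.List.slice_toNat _ (by positivity) (by positivity)]
  have h1 : ((3 * (j:Int) + 3).toNat - (3 * (j:Int)).toNat) = 3 := by omega
  have h2 : ((3 * (j:Int)).toNat) = 3 * j := by omega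
  rw [h1, h2, List.drop_drop, transCodonA]

-- B's translated window is the m-wide slice of A's translated frame at offset j
theorem window_eq_take_drop {α : Type} (g : Nat → α) (n m j : Nat) (hjm : j + m ≤ n) :
    (List.range m).map (fun k => g (j + k)) =
      (((List.range n).map g).drop j).take m := by
  apply List.ext_getElem
  · simp; omega
  · intro i h1 h2
    simp only [List.getElem_map, List.getElem_range, List.getElem_take, List.getElem_drop]

-- first matching index of range N, given a minimal witness
theorem find?_range_eq_some (N j0 : Nat) (p : Nat → Bool) (h0 : j0 < N)
    (hp : p j0 = true) (hmin : ∀ j < j0, p j = false) :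
    (List.range N).find? p = some j0 := by
  have hsplit : N = j0 + (N - j0) := by omega
  rw [hsplit, List.range_add, List.find?_append]
  have h1 : (List.range j0).find? p = none := by
    rw [List.find?_eq_none]
    intro x hx
    simp only [List.mem_range] at hx
    simp [hmin x hx]
  rw [h1]
  have h2 : N - j0 = 1 + (N - j0 - 1) := by omega
  rw [h2, List.range_add]
  simp [hp]

-- per-frame core: full translation + find  agrees with  the windowed first-match scan
theorem frame_find (g : Nat → Char) (p : List Char) (n m : Nat) (hm : m = p.length)
    (hnm : ¬ n < m) :
    (let aa := (List.range n).map g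
     let fd := PySem.Chars.find aa p
     (if fd ≠ -1 then some fd else none)) =
    ((List.range (n - m + 1)).find? (fun j =>
        (List.range m).map (fun k => g (j + k)) == p)).map (fun j : Nat => (j : Int)) := by
  simp only []
  set aa := (List.range n).map g with haa
  have hlen : aa.length = n := by simp [haa]
  by_cases hfd : PySem.Chars.find aa p = -1
  · rw [hfd]
    simp only [ne_eq, not_true_eq_false, if_false]
    have hninf : ¬ p <:+: aa := (PySem.Chars.find_eq_neg_one_iff _ _).mp hfd
    rw [List.find?_eq_none.mpr]
    · rfl
    · intro j hj hpred
      simp only [List.mem_range] at hj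
      simp only [beq_iff_eq] at hpred
      have hjm : j + m ≤ n := by omega
      rw [window_eq_take_drop g n m j hjm] at hpred
      apply hninf
      have hpre : p <+: aa.drop j := by
        rw [List.prefix_iff_eq_take, ← hm]; exact hpred.symm
      exact hpre.isInfix.trans (List.drop_suffix j aa).isInfix
  · have hge : 0 ≤ PySem.Chars.find aa p := by
      have := PySem.Chars.neg_one_le_find aa p
      omega
    obtain ⟨hpre, hmin⟩ := PySem.Chars.find_spec hge
    set j0 := (PySem.Chars.find aa p).toNat with hj0
    have hle : PySem.Chars.find aa p ≤ n := by
      have := PySem.Chars.find_le_length aa p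
      omega
    have hj0n : j0 ≤ n := by omega
    have hj0m : j0 + m ≤ n := by
      have h := hpre.length_le
      rw [List.length_drop, hlen, ← hm] at h
      omega
    rw [find?_range_eq_some (n - m + 1) j0 _ (by omega)]
    · simp only [ne_eq, hfd, not_false_eq_true, if_true, Option.map_some]
      have h2 : PySem.Chars.find aa p = (j0 : Int) := by omega
      rw [h2]
    · rw [window_eq_take_drop g n m j0 hj0m]
      simp only [beq_iff_eq]
      rw [List.prefix_iff_eq_take] at hpre
      rw [hm, ← haa]
      exact hpre.symm
    · intro j hj
      simp only [beq_eq_false_iff_ne, ne_eq]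
      intro hpred
      have hjm : j + m ≤ n := by omega
      rw [window_eq_take_drop g n m j hjm] at hpred
      exact hmin j hj (by rw [List.prefix_iff_eq_take, ← hm]; exact hpred.symm)

-- the per-frame bodies of the two folds agree (fi is A's Int frame, f the same frame as Nat)
theorem frame_body_eq (adn : String) (p : List Char) (acc : List (Int × Int))
    (fi : Int) (f : Nat) (hfi : fi = (f : Int)) :
    (let aa := traduire_cadre adn fi
     let j := PySem.Chars.find aa p
     if j ≠ -1 then acc ++ [(fi, fi + 3 * j)] else acc) =
    (let n := (adn.toList.length - f) / 3
     if n < p.length then acc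
     else match (List.range (n - p.length + 1)).find? (fun j =>
         (List.range p.length).map (fun k => transCodonB adn.toList (f + 3 * (j + k))) == p) with
       | some j => acc ++ [((f : Int), (f : Int) + 3 * (j : Int))]
       | none => acc) := by
  subst hfi
  simp only []
  rw [traduire_eq_map adn f]
  set L := adn.toList
  set n := (L.length - f) / 3 with hn
  set g : Nat → Char := fun j => transCodonA L (f + 3 * j) with hg
  by_cases hnm : n < p.length
  · -- the protein is longer than the frame: find returns -1, the scan is empty
    have hninf : ¬ p <:+: ((List.range n).map g) := by
      intro h
      have := h.length_le
      simp at this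
      omega
    rw [(PySem.Chars.find_eq_neg_one_iff _ _).mpr hninf]
    simp [hnm]
  · -- inside the scan every window codon is complete, so B's arithmetic lookup = A's dict
    have h3n : 3 * n ≤ L.length - f := by
      have := Nat.div_mul_le_self (L.length - f) 3
      omega
    have hfL : p.length = 0 ∨ f + 3 * n ≤ L.length := by
      by_cases hp0 : p.length = 0
      · exact Or.inl hp0
      · right
        have hn1 : 1 ≤ n := by omega
        omega
    have hpred : ∀ j ∈ List.range (n - p.length + 1),
        ((List.range p.length).map (fun k => transCodonB L (f + 3 * (j + k))) == p) =
        ((List.range p.length).map (fun k => g (j + k)) == p) := by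
      intro j hj
      simp only [List.mem_range] at hj
      congr 1
      apply List.map_congr_left
      intro k hk
      simp only [List.mem_range] at hk
      rw [hg]
      apply transCodonB_eq_A
      rcases hfL with hp0 | hbnd
      · omega
      · have : j + k + 1 ≤ n := by omega
        omega
    rw [find?_ext _ _ _ hpred]
    have hcore := frame_find g p n p.length rfl hnm
    simp only [] at hcore
    simp only [if_neg hnm]
    cases hfind : (List.range (n - p.length + 1)).find? (fun j =>
        (List.range p.length).map (fun k => g (j + k)) == p) with
    | none =>
        rw [hfind, Option.map_none] at hcore
        have : PySem.Chars.find ((List.range n).map g) p = -1 := by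
          by_contra hne
          simp [hne] at hcore
        simp [this]
    | some j =>
        rw [hfind, Option.map_some] at hcore
        have hne : PySem.Chars.find ((List.range n).map g) p ≠ -1 := by
          intro h
          simp [h] at hcore
        rw [if_pos hne] at hcore
        have hval : PySem.Chars.find ((List.range n).map g) p = (j : Int) :=
          Option.some.inj hcore
        rw [hval] at hne ⊢
        simp [hne]

-- ===== VERDICT (by name: the statement is the Claim_ definition above) =====
theorem cadre_par_recherche_complete_spec : Claim_equal_cadre_par_recherche_complete := by
  intro adn proteine _
  unfold Spec_cadre_par_recherche_complete cadre_par_recherche_complete cadre_par_recherche_complete_alt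
  simp only [List.foldl]
  rw [frame_body_eq adn proteine.toList [] 0 0 (by norm_num)]
  rw [frame_body_eq adn proteine.toList _ 1 1 (by norm_num)]
  rw [frame_body_eq adn proteine.toList _ 2 2 (by norm_num)]
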